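-- pv_equiv track=rewrite | github.com/Furina-star/League-of-Legends-Analyst-Discord-bot | modules/persona/tags.py | get_draft_warnings
-- ===== SOURCE A (Python) =====
-- def get_draft_warnings(locked_champs: list, role_db: dict) -> list[str]:
--     if not locked_champs:
--         return []
--
--     tags = ["DAMAGE_AD", "DAMAGE_AP", "FRONTLINE", "RANGED", "HARD_CC", "ENGAGE", "WAVECLEAR", "SCALING"]
--     counts = {
--         tag: sum(1 for c in locked_champs if c in set(role_db.get(tag, [])))
--         for tag in tags
--     }
--
--     warnings = []
--
--     # Damage Type Warnings
--     if counts["DAMAGE_AD"] >= 4: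
--         warnings.append("⚠️ **Warning: Heavy AD.** Enemy armor stacking will be highly effective.")
--     elif counts["DAMAGE_AP"] >= 4:
--         warnings.append("⚠️ **Warning: Heavy AP.** Enemy Magic Resist stacking will counter you.")
--
--     # Data-driven Structure Warnings
--     if len(locked_champs) >= 4:
--         rules = [
--             (counts["FRONTLINE"] == 0, "🛡️ **Warning: Glass Cannon Comp.** No dedicated frontline detected. Highly vulnerable to hard engage."),
--             (counts["RANGED"] == 0, "🏹 **Warning: Full Melee Comp.** Your team lacks ranged damage and is highly susceptible to kiting."),
--             (counts["HARD_CC"] == 0, "🛑 **Warning: No Hard CC.** Your team has extremely limited ways to lock down priority targets."),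
--             (counts["ENGAGE"] == 0, "🏃 **Warning: No Engage.** Your team lacks reliable tools to force favorable team fights."),
--             (counts["WAVECLEAR"] == 0, "🌊 **Warning: No Waveclear.** Your team will struggle to break base sieges or defend inhibitors."),
--             (counts["SCALING"] >= 3, "⏳ **Warning: Extreme Scaling.** Very weak early game detected. You will likely concede early objectives.")
--         ]
--         # A single generator extracts all triggered warnings at once
--         warnings.extend(msg for condition, msg in rules if condition)
--
--     return warnings
-- ===== SOURCE B (Python) =====
-- def get_draft_warnings(locked_champs: list, role_db: dict) -> list[str]:
--     if not locked_champs: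
--         return []
--
--     tags = ["DAMAGE_AD", "DAMAGE_AP", "FRONTLINE", "RANGED", "HARD_CC", "ENGAGE", "WAVECLEAR", "SCALING"]
--
--     # Inverted index: champion -> set of relevant tags it belongs to.
--     champ_tags = {}
--     for tag in tags:
--         for c in role_db.get(tag, []):
--             champ_tags.setdefault(c, set()).add(tag)
--
--     # One champ-major pass over the draft (per-occurrence counting).
--     tag_counts = {}
--     for c in locked_champs:
--         for t in champ_tags.get(c, ()):
--             tag_counts[t] = tag_counts.get(t, 0) + 1
--
--     def cnt(tag):
--         return tag_counts.get(tag, 0)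
--
--     warnings = []
--
--     # Damage Type Warnings
--     if cnt("DAMAGE_AD") >= 4:
--         warnings.append("⚠️ **Warning: Heavy AD.** Enemy armor stacking will be highly effective.")
--     elif cnt("DAMAGE_AP") >= 4:
--         warnings.append("⚠️ **Warning: Heavy AP.** Enemy Magic Resist stacking will counter you.")
--
--     # Data-driven Structure Warnings
--     if len(locked_champs) >= 4:
--         rules = [
--             (cnt("FRONTLINE") == 0, "🛡️ **Warning: Glass Cannon Comp.** No dedicated frontline detected. Highly vulnerable to hard engage."),
--             (cnt("RANGED") == 0, "🏹 **Warning: Full Melee Comp.** Your team lacks ranged damage and is highly susceptible to kiting."),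
--             (cnt("HARD_CC") == 0, "🛑 **Warning: No Hard CC.** Your team has extremely limited ways to lock down priority targets."),
--             (cnt("ENGAGE") == 0, "🏃 **Warning: No Engage.** Your team lacks reliable tools to force favorable team fights."),
--             (cnt("WAVECLEAR") == 0, "🌊 **Warning: No Waveclear.** Your team will struggle to break base sieges or defend inhibitors."),
--             (cnt("SCALING") >= 3, "⏳ **Warning: Extreme Scaling.** Very weak early game detected. You will likely concede early objectives.")
--         ]
--         warnings.extend(msg for condition, msg in rules if condition)
--
--     return warnings
-- ===== Notes on version B (the rewrite author's own statement) =====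
-- stated objective: faster
-- what changed: Replaces A's per-tag rescans of locked_champs (each with a membership set rebuilt from role_db) by building an inverted index champion->tags from role_db once and making a single champ-major counting pass over locked_champs.
import Mathlib
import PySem

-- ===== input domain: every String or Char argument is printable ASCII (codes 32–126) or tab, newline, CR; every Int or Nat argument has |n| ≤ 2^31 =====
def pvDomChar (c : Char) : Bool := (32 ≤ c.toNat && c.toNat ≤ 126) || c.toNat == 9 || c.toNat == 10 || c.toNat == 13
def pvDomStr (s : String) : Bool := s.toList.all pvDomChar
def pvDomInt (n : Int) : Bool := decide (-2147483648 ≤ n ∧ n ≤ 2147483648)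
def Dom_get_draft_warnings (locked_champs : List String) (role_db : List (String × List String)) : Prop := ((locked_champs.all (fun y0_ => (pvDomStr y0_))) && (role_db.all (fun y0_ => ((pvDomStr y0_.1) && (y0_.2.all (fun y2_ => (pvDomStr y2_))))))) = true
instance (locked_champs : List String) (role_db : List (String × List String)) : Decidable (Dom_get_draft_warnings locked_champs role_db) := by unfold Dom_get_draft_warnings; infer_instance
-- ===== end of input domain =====

-- B replaces A's per-tag rescans of locked_champs by an inverted index (champion -> its relevant
-- tags, built once from role_db) plus one champ-major counting pass; the warning rules are unchanged.

-- shared literal data and the warning-emission block, identical in both Pythons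
def pvTags : List String :=
  ["DAMAGE_AD", "DAMAGE_AP", "FRONTLINE", "RANGED", "HARD_CC", "ENGAGE", "WAVECLEAR", "SCALING"]

def pvWarnBlock (n : Nat) (cAD cAP cFL cR cCC cE cW cS : Int) : List String :=
  let warnings : List String :=
    if cAD ≥ 4 then
      ["⚠️ **Warning: Heavy AD.** Enemy armor stacking will be highly effective."]
    else if cAP ≥ 4 then
      ["⚠️ **Warning: Heavy AP.** Enemy Magic Resist stacking will counter you."]
    else []
  if 4 ≤ n then
    warnings ++
      (([(cFL == 0, "🛡️ **Warning: Glass Cannon Comp.** No dedicated frontline detected. Highly vulnerable to hard engage."),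
         (cR == 0, "🏹 **Warning: Full Melee Comp.** Your team lacks ranged damage and is highly susceptible to kiting."),
         (cCC == 0, "🛑 **Warning: No Hard CC.** Your team has extremely limited ways to lock down priority targets."),
         (cE == 0, "🏃 **Warning: No Engage.** Your team lacks reliable tools to force favorable team fights."),
         (cW == 0, "🌊 **Warning: No Waveclear.** Your team will struggle to break base sieges or defend inhibitors."),
         (cS ≥ 3, "⏳ **Warning: Extreme Scaling.** Very weak early game detected. You will likely concede early objectives.")]
        : List (Bool × String)).filterMap (fun r => if r.1 then some r.2 else none))
  else warnings

-- ===== PORT A =====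
-- counts = {tag: sum(1 for c in locked_champs if c in set(role_db.get(tag, []))) for tag in tags}
def pvCountsA (locked_champs : List String) (role_db : List (String × List String)) : PySem.Dict String Int :=
  pvTags.foldl (fun d tag =>
    d.insert tag (locked_champs.foldl
      (fun s c => if PySem.Set.contains (PySem.Set.ofList ((PySem.Dict.mk role_db).getD tag [])) c then s + 1 else s) 0))
    PySem.Dict.empty

def get_draft_warnings (locked_champs : List String) (role_db : List (String × List String)) : List String :=
  if locked_champs = [] then []
  else
    let counts := pvCountsA locked_champs role_db
    -- counts[tag]: every tag was inserted above, so the lookup cannot raise; getD 0 is exact here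
    pvWarnBlock locked_champs.length
      (counts.getD "DAMAGE_AD" 0) (counts.getD "DAMAGE_AP" 0) (counts.getD "FRONTLINE" 0)
      (counts.getD "RANGED" 0) (counts.getD "HARD_CC" 0) (counts.getD "ENGAGE" 0)
      (counts.getD "WAVECLEAR" 0) (counts.getD "SCALING" 0)

-- ===== PORT B =====
-- for tag in tags: for c in role_db.get(tag, []): champ_tags.setdefault(c, set()).add(tag)
def pvChampTags (role_db : List (String × List String)) : PySem.Dict String (PySem.Set String) :=
  pvTags.foldl (fun d tag =>
    ((PySem.Dict.mk role_db).getD tag []).foldl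
      (fun d c => d.insert c (PySem.Set.add (d.getD c PySem.Set.empty) tag)) d)
    PySem.Dict.empty

-- for c in locked_champs: for t in champ_tags.get(c, ()): tag_counts[t] = tag_counts.get(t, 0) + 1
def pvTagCounts (locked_champs : List String) (role_db : List (String × List String)) : PySem.Dict String Int :=
  locked_champs.foldl (fun d c =>
    ((pvChampTags role_db).getD c PySem.Set.empty).foldl
      (fun d t => d.insert t (d.getD t 0 + 1)) d)
    PySem.Dict.empty

def get_draft_warnings_alt (locked_champs : List String) (role_db : List (String × List String)) : List String :=
  if locked_champs = [] then []
  else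
    let cnt := pvTagCounts locked_champs role_db
    pvWarnBlock locked_champs.length
      (cnt.getD "DAMAGE_AD" 0) (cnt.getD "DAMAGE_AP" 0) (cnt.getD "FRONTLINE" 0)
      (cnt.getD "RANGED" 0) (cnt.getD "HARD_CC" 0) (cnt.getD "ENGAGE" 0)
      (cnt.getD "WAVECLEAR" 0) (cnt.getD "SCALING" 0)

-- ===== PRECONDITION & SPEC =====
def Spec_get_draft_warnings (locked_champs : List String) (role_db : List (String × List String)) (out : List String) : Prop := out = get_draft_warnings_alt locked_champs role_db
instance (locked_champs : List String) (role_db : List (String × List String)) (out : List String) : Decidable (Spec_get_draft_warnings locked_champs role_db out) := by unfold Spec_get_draft_warnings; infer_instance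

-- ===== CLAIM (what is proved, stated in full; the proofs are below) =====
def Claim_equal_get_draft_warnings : Prop := ∀ (locked_champs : List String) (role_db : List (String × List String)), Dom_get_draft_warnings locked_champs role_db → Spec_get_draft_warnings locked_champs role_db (get_draft_warnings locked_champs role_db)

-- ===== LEMMAS AND PROOFS =====

-- A's counts dict: a fold of inserts whose values do not depend on the accumulator
theorem pv_getD_foldl_insert_not_mem (l : List String) (f : String → Int)
    (d : PySem.Dict String Int) (t : String) (h : t ∉ l) :
    (l.foldl (fun d tag => d.insert tag (f tag)) d).getD t 0 = d.getD t 0 := by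
  induction l generalizing d with
  | nil => rfl
  | cons x l ih =>
    simp only [List.foldl_cons]
    rw [ih _ (by simp_all), PySem.Dict.getD_insert]
    simp_all

theorem pv_getD_foldl_insert_indep (l : List String) (f : String → Int)
    (d : PySem.Dict String Int) (t : String) (h : t ∈ l) (hl : l.Nodup) :
    (l.foldl (fun d tag => d.insert tag (f tag)) d).getD t 0 = f t := by
  induction l generalizing d with
  | nil => simp at h
  | cons x l ih =>
    simp only [List.foldl_cons]
    rcases List.mem_cons.mp h with rfl | ht
    · rw [pv_getD_foldl_insert_not_mem _ _ _ _ (by simp_all)]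
      rw [PySem.Dict.getD_insert]; simp
    · exact ih _ ht (by simp_all)

-- inverted index, inner loop over one tag's champion list
theorem pv_ct_inner_mem (l : List String) (tag : String)
    (d : PySem.Dict String (PySem.Set String)) (c t : String) :
    t ∈ (l.foldl (fun d c => d.insert c (PySem.Set.add (d.getD c PySem.Set.empty) tag)) d).getD c PySem.Set.empty
      ↔ t ∈ d.getD c PySem.Set.empty ∨ (t = tag ∧ c ∈ l) := by
  induction l generalizing d with
  | nil => simp
  | cons x l ih =>
    simp only [List.foldl_cons]
    rw [ih]
    rw [PySem.Dict.getD_insert]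
    by_cases hcx : c = x
    · subst hcx
      rw [if_pos rfl]
      simp only [PySem.Set.mem_add, List.mem_cons]
      tauto
    · simp only [if_neg hcx, List.mem_cons]
      constructor
      · rintro (h | ⟨rfl, hc⟩) <;> tauto
      · rintro (h | ⟨rfl, (rfl | hc)⟩) <;> tauto

theorem pv_ct_inner_nodup (l : List String) (tag : String)
    (d : PySem.Dict String (PySem.Set String)) (h : ∀ c, (d.getD c PySem.Set.empty).Nodup) (c : String) :
    ((l.foldl (fun d c => d.insert c (PySem.Set.add (d.getD c PySem.Set.empty) tag)) d).getD c PySem.Set.empty).Nodup := by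
  induction l generalizing d with
  | nil => exact h c
  | cons x l ih =>
    simp only [List.foldl_cons]
    refine ih _ (fun c' => ?_)
    rw [PySem.Dict.getD_insert]
    split
    · exact PySem.Set.nodup_add _ _ (h x)
    · exact h c'

-- inverted index, outer loop over the tag list
theorem pv_ct_outer_mem (tags : List String) (role_db : List (String × List String))
    (d : PySem.Dict String (PySem.Set String)) (c t : String) :
    t ∈ (tags.foldl (fun d tag =>
          ((PySem.Dict.mk role_db).getD tag []).foldl
            (fun d c => d.insert c (PySem.Set.add (d.getD c PySem.Set.empty) tag)) d) d).getD c PySem.Set.empty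
      ↔ t ∈ d.getD c PySem.Set.empty ∨ (t ∈ tags ∧ c ∈ (PySem.Dict.mk role_db).getD t []) := by
  induction tags generalizing d with
  | nil => simp
  | cons tg rest ih =>
    simp only [List.foldl_cons]
    rw [ih, pv_ct_inner_mem]
    constructor
    · rintro ((h | ⟨rfl, hc⟩) | ⟨hr, hc⟩)
      · exact Or.inl h
      · exact Or.inr ⟨by simp, hc⟩
      · exact Or.inr ⟨by simp [hr], hc⟩
    · rintro (h | ⟨hr, hc⟩)
      · exact Or.inl (Or.inl h)
      · rcases List.mem_cons.mp hr with rfl | hr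
        · exact Or.inl (Or.inr ⟨rfl, hc⟩)
        · exact Or.inr ⟨hr, hc⟩

theorem pv_ct_outer_nodup (tags : List String) (role_db : List (String × List String))
    (d : PySem.Dict String (PySem.Set String)) (h : ∀ c, (d.getD c PySem.Set.empty).Nodup) (c : String) :
    ((tags.foldl (fun d tag =>
        ((PySem.Dict.mk role_db).getD tag []).foldl
          (fun d c => d.insert c (PySem.Set.add (d.getD c PySem.Set.empty) tag)) d) d).getD c PySem.Set.empty).Nodup := by
  induction tags generalizing d with
  | nil => exact h c
  | cons tg rest ih =>
    simp only [List.foldl_cons]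
    exact ih _ (pv_ct_inner_nodup _ _ _ h)

-- the champ-major counting pass
theorem pv_cnt_lemma (locked : List String) (g : String → List String)
    (d : PySem.Dict String Int) (t : String) :
    (locked.foldl (fun d c => (g c).foldl (fun d t => d.insert t (d.getD t 0 + 1)) d) d).getD t 0
      = d.getD t 0 + ((locked.map (fun c => ((g c).count t : Int))).sum) := by
  induction locked generalizing d with
  | nil => simp
  | cons x l ih =>
    simp only [List.foldl_cons, List.map_cons, List.sum_cons]
    rw [ih, PySem.Dict.getD_foldl_insert_add_one]
    ring

-- per-tag agreement of the two count tables
theorem pv_counts_agree (locked_champs : List String) (role_db : List (String × List String))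
    (t : String) (ht : t ∈ pvTags) :
    (pvCountsA locked_champs role_db).getD t 0 = (pvTagCounts locked_champs role_db).getD t 0 := by
  have hnd : pvTags.Nodup := by decide
  rw [pvCountsA, pv_getD_foldl_insert_indep _ _ _ _ ht hnd, PySem.List.foldl_count_if]
  rw [pvTagCounts, pv_cnt_lemma]
  have hcount : ∀ c : String,
      (((pvChampTags role_db).getD c PySem.Set.empty).count t : Int)
        = if ((PySem.Dict.mk role_db).getD t []).contains c then 1 else 0 := by
    intro c
    by_cases hc : c ∈ (PySem.Dict.mk role_db).getD t []
    · rw [List.count_eq_one_of_mem]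
      · simp [hc]
      · exact pv_ct_outer_nodup pvTags role_db PySem.Dict.empty (by simp [PySem.Dict.getD]) c
      · exact (pv_ct_outer_mem pvTags role_db PySem.Dict.empty c t).mpr (Or.inr ⟨ht, hc⟩)
    · rw [List.count_eq_zero.mpr]
      · simp [hc]
      · intro hmem
        rcases (pv_ct_outer_mem pvTags role_db PySem.Dict.empty c t).mp hmem with h | ⟨_, hc'⟩
        · simp [PySem.Dict.getD] at h
        · exact hc hc'
  rw [List.map_congr_left (fun c _ => hcount c)]
  rw [PySem.List.sum_map_ite_one_zero]
  have hcp : List.countP (PySem.Set.ofList ((PySem.Dict.mk role_db).getD t [])).contains locked_champs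
      = List.countP ((PySem.Dict.mk role_db).getD t []).contains locked_champs := by
    apply List.countP_congr
    intro c _
    simp [pysem]
  rw [hcp]
  simp [PySem.Dict.getD, PySem.Dict.empty, PySem.Dict.get?]

-- ===== VERDICT (by name: the statement is the Claim_ definition above) =====
theorem get_draft_warnings_spec : Claim_equal_get_draft_warnings := by
  intro locked_champs role_db _
  unfold Spec_get_draft_warnings get_draft_warnings get_draft_warnings_alt
  by_cases h : locked_champs = []
  · simp [h]
  · simp only [h, if_false]
    rw [pv_counts_agree _ _ _ (by decide), pv_counts_agree _ _ _ (by decide),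
        pv_counts_agree _ _ _ (by decide), pv_counts_agree _ _ _ (by decide),
        pv_counts_agree _ _ _ (by decide), pv_counts_agree _ _ _ (by decide),
        pv_counts_agree _ _ _ (by decide), pv_counts_agree _ _ _ (by decide)]
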